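-- pv_equiv track=rewrite | github.com/jameslg383/nashguide | api/routes/analytics.py | detect_bot_type
-- ===== SOURCE A (Python) =====
-- def detect_bot_type(user_agent: str | None) -> str:
--     if not user_agent:
--         return "unknown"
--     ua = user_agent.lower()
--     if any(x in ua for x in ['googlebot', 'google']):
--         return 'Google'
--     if any(x in ua for x in ['bingbot', 'bing']):
--         return 'Bing'
--     if 'yandex' in ua:
--         return 'Yandex'
--     if 'baidu' in ua:
--         return 'Baidu'
--     if any(x in ua for x in ['facebook', 'facebookexternalhit']):
--         return 'Facebook'
--     if 'twitter' in ua: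
--         return 'Twitter'
--     if 'linkedin' in ua:
--         return 'LinkedIn'
--     if any(x in ua for x in ['ahrefs', 'semrush', 'mj12', 'dotbot', 'serpstat']):
--         return 'SEO Crawler'
--     if any(x in ua for x in ['gptbot', 'ccbot', 'claudebot', 'anthropic', 'chatgpt']):
--         return 'AI Bot'
--     if any(x in ua for x in ['curl', 'wget', 'python', 'httpx', 'go-http', 'java', 'apache']):
--         return 'Script/Library'
--     if any(x in ua for x in ['headless', 'phantom', 'selenium', 'puppeteer']):
--         return 'Headless Browser'
--     if any(x in ua for x in ['lighthouse', 'pagespeed', 'gtmetrix', 'pingdom', 'uptime', 'monitor']):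
--         return 'Monitoring'
--     return 'Other Bot'
-- ===== SOURCE B (Python) =====
-- # Text-major scan: instead of searching the text once per pattern (pattern-major
-- # cascade), walk the text positions once and keep the best (lowest) label rank
-- # of any pattern that starts at the current position.
--
-- LABELS = ['Google', 'Bing', 'Yandex', 'Baidu', 'Facebook', 'Twitter',
--           'LinkedIn', 'SEO Crawler', 'AI Bot', 'Script/Library',
--           'Headless Browser', 'Monitoring']
--
-- FLAT = [('googlebot', 0), ('google', 0),
--         ('bingbot', 1), ('bing', 1),
--         ('yandex', 2),
--         ('baidu', 3),
--         ('facebook', 4), ('facebookexternalhit', 4),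
--         ('twitter', 5),
--         ('linkedin', 6),
--         ('ahrefs', 7), ('semrush', 7), ('mj12', 7), ('dotbot', 7), ('serpstat', 7),
--         ('gptbot', 8), ('ccbot', 8), ('claudebot', 8), ('anthropic', 8), ('chatgpt', 8),
--         ('curl', 9), ('wget', 9), ('python', 9), ('httpx', 9), ('go-http', 9),
--         ('java', 9), ('apache', 9),
--         ('headless', 10), ('phantom', 10), ('selenium', 10), ('puppeteer', 10),
--         ('lighthouse', 11), ('pagespeed', 11), ('gtmetrix', 11), ('pingdom', 11),
--         ('uptime', 11), ('monitor', 11)]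
--
--
-- def detect_bot_type(user_agent):
--     if not user_agent:
--         return "unknown"
--     ua = user_agent.lower()
--     best = len(LABELS)
--     for i in range(len(ua)):
--         for p, r in FLAT:
--             if r < best and ua.startswith(p, i):
--                 best = r
--     return LABELS[best] if best < len(LABELS) else 'Other Bot'
-- ===== Notes on version B (the rewrite author's own statement) =====
-- stated objective: alternative
-- what changed: Inverts the traversal: instead of A's pattern-major cascade (one substring search of the text per branch), B makes a single text-major pass over the positions of the lowercased UA, checking at each position which flat (pattern, rank) entries start there and folding the minimum label rank, then maps the rank to its label.
import Mathlib
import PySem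

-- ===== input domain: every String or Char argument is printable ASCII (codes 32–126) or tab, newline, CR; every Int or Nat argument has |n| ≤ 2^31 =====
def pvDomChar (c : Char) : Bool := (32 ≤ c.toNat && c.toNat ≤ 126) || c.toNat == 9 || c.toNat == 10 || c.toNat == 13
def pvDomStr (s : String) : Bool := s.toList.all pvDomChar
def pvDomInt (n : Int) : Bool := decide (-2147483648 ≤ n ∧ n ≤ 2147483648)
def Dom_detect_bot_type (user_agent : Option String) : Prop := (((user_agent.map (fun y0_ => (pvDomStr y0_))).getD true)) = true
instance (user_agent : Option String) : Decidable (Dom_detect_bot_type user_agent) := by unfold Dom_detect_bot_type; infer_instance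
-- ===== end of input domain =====

-- B replaces A's pattern-major if-cascade by a single text-major scan: one pass over the
-- positions of the lowercased UA folding the minimum matching label rank (objective: alternative).

-- ===== PORT A =====
def detect_bot_type (user_agent : Option String) : String :=
  match user_agent with
  | none => "unknown"
  | some s =>
    if s = "" then "unknown"
    else
      let ua := PySem.Str.lower s
      if (["googlebot", "google"].any (fun x => PySem.Str.isIn x ua)) then "Google"
      else if (["bingbot", "bing"].any (fun x => PySem.Str.isIn x ua)) then "Bing"
      else if PySem.Str.isIn "yandex" ua then "Yandex"
      else if PySem.Str.isIn "baidu" ua then "Baidu"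
      else if (["facebook", "facebookexternalhit"].any (fun x => PySem.Str.isIn x ua)) then "Facebook"
      else if PySem.Str.isIn "twitter" ua then "Twitter"
      else if PySem.Str.isIn "linkedin" ua then "LinkedIn"
      else if (["ahrefs", "semrush", "mj12", "dotbot", "serpstat"].any (fun x => PySem.Str.isIn x ua)) then "SEO Crawler"
      else if (["gptbot", "ccbot", "claudebot", "anthropic", "chatgpt"].any (fun x => PySem.Str.isIn x ua)) then "AI Bot"
      else if (["curl", "wget", "python", "httpx", "go-http", "java", "apache"].any (fun x => PySem.Str.isIn x ua)) then "Script/Library"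
      else if (["headless", "phantom", "selenium", "puppeteer"].any (fun x => PySem.Str.isIn x ua)) then "Headless Browser"
      else if (["lighthouse", "pagespeed", "gtmetrix", "pingdom", "uptime", "monitor"].any (fun x => PySem.Str.isIn x ua)) then "Monitoring"
      else "Other Bot"

-- ===== PORT B =====
def pvLabels : List String :=
  ["Google", "Bing", "Yandex", "Baidu", "Facebook", "Twitter", "LinkedIn",
   "SEO Crawler", "AI Bot", "Script/Library", "Headless Browser", "Monitoring"]

def pvFlat : List (String × Nat) :=
  [("googlebot", 0), ("google", 0),
   ("bingbot", 1), ("bing", 1),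
   ("yandex", 2),
   ("baidu", 3),
   ("facebook", 4), ("facebookexternalhit", 4),
   ("twitter", 5),
   ("linkedin", 6),
   ("ahrefs", 7), ("semrush", 7), ("mj12", 7), ("dotbot", 7), ("serpstat", 7),
   ("gptbot", 8), ("ccbot", 8), ("claudebot", 8), ("anthropic", 8), ("chatgpt", 8),
   ("curl", 9), ("wget", 9), ("python", 9), ("httpx", 9), ("go-http", 9),
   ("java", 9), ("apache", 9),
   ("headless", 10), ("phantom", 10), ("selenium", 10), ("puppeteer", 10),
   ("lighthouse", 11), ("pagespeed", 11), ("gtmetrix", 11), ("pingdom", 11),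
   ("uptime", 11), ("monitor", 11)]

-- ua.startswith(p, i) ported as PySem.Chars.startswith on the dropped suffix (exact for 0 ≤ i)
def detect_bot_type_alt (user_agent : Option String) : String :=
  match user_agent with
  | none => "unknown"
  | some s =>
    if s = "" then "unknown"
    else
      let ua := (PySem.Str.lower s).toList
      let best := (List.range ua.length).foldl
        (fun b i => pvFlat.foldl
          (fun b pr => if pr.2 < b && PySem.Chars.startswith (ua.drop i) pr.1.toList then pr.2 else b) b)
        pvLabels.length
      if best < pvLabels.length then pvLabels.getD best "Other Bot" else "Other Bot"

-- ===== PRECONDITION & SPEC =====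
def Spec_detect_bot_type (user_agent : Option String) (out : String) : Prop := out = detect_bot_type_alt user_agent
instance (user_agent : Option String) (out : String) : Decidable (Spec_detect_bot_type user_agent out) := by unfold Spec_detect_bot_type; infer_instance

-- ===== CLAIM (what is proved, stated in full; the proofs are below) =====
def Claim_equal_detect_bot_type : Prop := ∀ (user_agent : Option String), Dom_detect_bot_type user_agent → Spec_detect_bot_type user_agent (detect_bot_type user_agent)

-- ===== LEMMAS AND PROOFS =====

-- generic guarded-min fold (B's inner loop shape)
def pvMinFold {α : Type} (rank : α → Nat) (c : α → Bool) (xs : List α) (b : Nat) : Nat :=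
  xs.foldl (fun b x => if rank x < b && c x then rank x else b) b

lemma pvMinFold_cons {α : Type} (rank : α → Nat) (c : α → Bool) (y : α) (ys : List α) (b : Nat) :
    pvMinFold rank c (y :: ys) b = pvMinFold rank c ys (if rank y < b && c y then rank y else b) := rfl

lemma pvMinFold_le {α : Type} (rank : α → Nat) (c : α → Bool) (xs : List α) (b : Nat) :
    pvMinFold rank c xs b ≤ b := by
  induction xs generalizing b with
  | nil => exact Nat.le_refl b
  | cons y ys ih =>
    rw [pvMinFold_cons]
    by_cases h : (rank y < b && c y) = true
    · rw [if_pos h]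
      have hlt : rank y < b := by
        have h' := h
        simp only [Bool.and_eq_true, decide_eq_true_eq] at h'
        exact h'.1
      exact le_trans (ih _) (Nat.le_of_lt hlt)
    · rw [if_neg h]
      exact ih b

lemma pvMinFold_le_of_mem {α : Type} (rank : α → Nat) (c : α → Bool) {xs : List α} {x : α}
    (hx : x ∈ xs) (hc : c x = true) (b : Nat) : pvMinFold rank c xs b ≤ rank x := by
  induction hx generalizing b with
  | head ys =>
    rw [pvMinFold_cons]
    by_cases hg : (rank x < b && c x) = true
    · rw [if_pos hg]
      exact pvMinFold_le rank c ys (rank x)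
    · rw [if_neg hg]
      have hnlt : ¬ rank x < b := by
        intro hlt
        exact hg (by simp [hlt, hc])
      exact le_trans (pvMinFold_le rank c ys b) (by omega)
  | tail y hmem ih =>
    rw [pvMinFold_cons]
    exact ih _

lemma pvMinFold_cases {α : Type} (rank : α → Nat) (c : α → Bool) (xs : List α) (b : Nat) :
    pvMinFold rank c xs b = b ∨ ∃ x ∈ xs, c x = true ∧ rank x = pvMinFold rank c xs b := by
  induction xs generalizing b with
  | nil => exact Or.inl rfl
  | cons y ys ih =>
    rw [pvMinFold_cons]
    by_cases h : (rank y < b && c y) = true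
    · rw [if_pos h]
      have hcy : c y = true := by
        have h' := h
        simp only [Bool.and_eq_true, decide_eq_true_eq] at h'
        exact h'.2
      rcases ih (rank y) with h' | ⟨x, hx, hc, hr⟩
      · exact Or.inr ⟨y, List.mem_cons_self, hcy, h'.symm⟩
      · exact Or.inr ⟨x, List.mem_cons_of_mem _ hx, hc, hr⟩
    · rw [if_neg h]
      rcases ih b with h' | ⟨x, hx, hc, hr⟩
      · exact Or.inl h'
      · exact Or.inr ⟨x, List.mem_cons_of_mem _ hx, hc, hr⟩

-- B's nested loop as an outer fold of inner pvMinFolds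
def pvOuter {α : Type} (rank : α → Nat) (c : Nat → α → Bool) (xs : List α) (is : List Nat) (b : Nat) : Nat :=
  is.foldl (fun b i => pvMinFold rank (c i) xs b) b

lemma pvOuter_cons {α : Type} (rank : α → Nat) (c : Nat → α → Bool) (xs : List α) (j : Nat) (js : List Nat) (b : Nat) :
    pvOuter rank c xs (j :: js) b = pvOuter rank c xs js (pvMinFold rank (c j) xs b) := rfl

lemma pvOuter_le {α : Type} (rank : α → Nat) (c : Nat → α → Bool) (xs : List α) (is : List Nat) (b : Nat) :
    pvOuter rank c xs is b ≤ b := by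
  induction is generalizing b with
  | nil => exact Nat.le_refl b
  | cons j js ih =>
    rw [pvOuter_cons]
    exact le_trans (ih _) (pvMinFold_le rank (c j) xs b)

lemma pvOuter_le_of_mem {α : Type} (rank : α → Nat) (c : Nat → α → Bool) (xs : List α) {is : List Nat}
    {i : Nat} {x : α} (hi : i ∈ is) (hx : x ∈ xs) (hc : c i x = true) (b : Nat) :
    pvOuter rank c xs is b ≤ rank x := by
  induction hi generalizing b with
  | head js =>
    rw [pvOuter_cons]
    exact le_trans (pvOuter_le rank c xs js _) (pvMinFold_le_of_mem rank (c i) hx hc b)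
  | tail j hmem ih =>
    rw [pvOuter_cons]
    exact ih _

lemma pvOuter_cases {α : Type} (rank : α → Nat) (c : Nat → α → Bool) (xs : List α) (is : List Nat) (b : Nat) :
    pvOuter rank c xs is b = b ∨ ∃ i ∈ is, ∃ x ∈ xs, c i x = true ∧ rank x = pvOuter rank c xs is b := by
  induction is generalizing b with
  | nil => exact Or.inl rfl
  | cons j js ih =>
    rw [pvOuter_cons]
    rcases ih (pvMinFold rank (c j) xs b) with h' | ⟨i, hi, x, hx, hc, hr⟩
    · rcases pvMinFold_cases rank (c j) xs b with h | ⟨x, hx, hc, hr⟩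
      · exact Or.inl (h'.trans h)
      · exact Or.inr ⟨j, List.mem_cons_self, x, hx, hc, hr.trans h'.symm⟩
    · exact Or.inr ⟨i, List.mem_cons_of_mem _ hi, x, hx, hc, hr⟩

-- bridge: position-wise startswith over range ↔ substring membership (nonempty pattern)
lemma pvExists_startswith_iff (ua p : List Char) (hp : p ≠ []) :
    (∃ i ∈ List.range ua.length, PySem.Chars.startswith (ua.drop i) p = true) ↔
      PySem.Chars.isIn p ua = true := by
  rw [← PySem.Chars.exists_prefix_drop_iff_isIn]
  constructor
  · rintro ⟨i, _, h⟩
    exact ⟨i, (PySem.Chars.startswith_iff _ _).mp h⟩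
  · rintro ⟨j, hj⟩
    by_cases hlt : j < ua.length
    · exact ⟨j, List.mem_range.mpr hlt, (PySem.Chars.startswith_iff _ _).mpr hj⟩
    · exfalso
      have : ua.drop j = [] := List.drop_eq_nil_of_le (by omega)
      rw [this] at hj
      exact hp (List.prefix_nil.mp hj)

-- the rank B's scan computes, and the "some pattern of rank k occurs" predicate
def pvBest (ua : List Char) : Nat :=
  pvOuter (fun pr => pr.2) (fun i pr => PySem.Chars.startswith (ua.drop i) pr.1.toList) pvFlat
    (List.range ua.length) 12

def pvHit (ua : List Char) (k : Nat) : Prop :=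
  ∃ pr ∈ pvFlat, pr.2 = k ∧ PySem.Chars.isIn pr.1.toList ua = true

lemma pvFlat_nonempty_pats : ∀ pr ∈ pvFlat, pr.1.toList ≠ [] := by decide

lemma pvBest_le (ua : List Char) : pvBest ua ≤ 12 := pvOuter_le _ _ _ _ _

lemma pvBest_le_of_hit {ua : List Char} {k : Nat} (h : pvHit ua k) : pvBest ua ≤ k := by
  rcases h with ⟨pr, hpr, hk, hin⟩
  rcases (pvExists_startswith_iff ua pr.1.toList (pvFlat_nonempty_pats pr hpr)).mpr hin with ⟨i, hi, hsw⟩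
  exact hk ▸ pvOuter_le_of_mem _ _ _ hi hpr hsw _

lemma pvBest_hit_or (ua : List Char) : pvBest ua = 12 ∨ pvHit ua (pvBest ua) := by
  rcases pvOuter_cases (fun pr => pr.2) (fun i pr => PySem.Chars.startswith (ua.drop i) pr.1.toList)
      pvFlat (List.range ua.length) 12 with h | ⟨i, hi, x, hx, hc, hr⟩
  · exact Or.inl h
  · right
    refine ⟨x, hx, hr, ?_⟩
    exact (pvExists_startswith_iff ua x.1.toList (pvFlat_nonempty_pats x hx)).mp ⟨i, hi, hc⟩

lemma pvBest_eq_of_first {ua : List Char} {k : Nat} (hk : k < 12)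
    (hlow : ∀ j < k, ¬ pvHit ua j) (hhit : pvHit ua k) : pvBest ua = k := by
  have h1 : pvBest ua ≤ k := pvBest_le_of_hit hhit
  rcases pvBest_hit_or ua with h | h
  · omega
  · by_contra hne
    exact hlow (pvBest ua) (by omega) h

lemma pvBest_eq_twelve {ua : List Char} (h : ∀ j < 12, ¬ pvHit ua j) : pvBest ua = 12 := by
  rcases pvBest_hit_or ua with h' | h'
  · exact h'
  · have := pvBest_le ua
    by_contra hne
    exact h (pvBest ua) (by omega) h'

lemma pvHit0_iff (s : String) :
    pvHit ((PySem.Str.lower s).toList) 0 ↔ (["googlebot", "google"].any (fun x => PySem.Str.isIn x (PySem.Str.lower s))) = true := by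
  simp [pvHit, pvFlat]

lemma pvHit1_iff (s : String) :
    pvHit ((PySem.Str.lower s).toList) 1 ↔ (["bingbot", "bing"].any (fun x => PySem.Str.isIn x (PySem.Str.lower s))) = true := by
  simp [pvHit, pvFlat]

lemma pvHit2_iff (s : String) :
    pvHit ((PySem.Str.lower s).toList) 2 ↔ (PySem.Str.isIn "yandex" (PySem.Str.lower s)) = true := by
  simp [pvHit, pvFlat]

lemma pvHit3_iff (s : String) :
    pvHit ((PySem.Str.lower s).toList) 3 ↔ (PySem.Str.isIn "baidu" (PySem.Str.lower s)) = true := by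
  simp [pvHit, pvFlat]

lemma pvHit4_iff (s : String) :
    pvHit ((PySem.Str.lower s).toList) 4 ↔ (["facebook", "facebookexternalhit"].any (fun x => PySem.Str.isIn x (PySem.Str.lower s))) = true := by
  simp [pvHit, pvFlat]

lemma pvHit5_iff (s : String) :
    pvHit ((PySem.Str.lower s).toList) 5 ↔ (PySem.Str.isIn "twitter" (PySem.Str.lower s)) = true := by
  simp [pvHit, pvFlat]

lemma pvHit6_iff (s : String) :
    pvHit ((PySem.Str.lower s).toList) 6 ↔ (PySem.Str.isIn "linkedin" (PySem.Str.lower s)) = true := by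
  simp [pvHit, pvFlat]

lemma pvHit7_iff (s : String) :
    pvHit ((PySem.Str.lower s).toList) 7 ↔ (["ahrefs", "semrush", "mj12", "dotbot", "serpstat"].any (fun x => PySem.Str.isIn x (PySem.Str.lower s))) = true := by
  simp [pvHit, pvFlat]

lemma pvHit8_iff (s : String) :
    pvHit ((PySem.Str.lower s).toList) 8 ↔ (["gptbot", "ccbot", "claudebot", "anthropic", "chatgpt"].any (fun x => PySem.Str.isIn x (PySem.Str.lower s))) = true := by
  simp [pvHit, pvFlat]

lemma pvHit9_iff (s : String) :
    pvHit ((PySem.Str.lower s).toList) 9 ↔ (["curl", "wget", "python", "httpx", "go-http", "java", "apache"].any (fun x => PySem.Str.isIn x (PySem.Str.lower s))) = true := by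
  simp [pvHit, pvFlat]

lemma pvHit10_iff (s : String) :
    pvHit ((PySem.Str.lower s).toList) 10 ↔ (["headless", "phantom", "selenium", "puppeteer"].any (fun x => PySem.Str.isIn x (PySem.Str.lower s))) = true := by
  simp [pvHit, pvFlat]

lemma pvHit11_iff (s : String) :
    pvHit ((PySem.Str.lower s).toList) 11 ↔ (["lighthouse", "pagespeed", "gtmetrix", "pingdom", "uptime", "monitor"].any (fun x => PySem.Str.isIn x (PySem.Str.lower s))) = true := by
  simp [pvHit, pvFlat]

lemma pvAlt_some (s : String) (hs : ¬ s = "") :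
    detect_bot_type_alt (some s) =
      (if pvBest ((PySem.Str.lower s).toList) < 12 then
         pvLabels.getD (pvBest ((PySem.Str.lower s).toList)) "Other Bot"
       else "Other Bot") := by
  simp only [detect_bot_type_alt, if_neg hs]
  rfl

-- ===== VERDICT (by name: the statement is the Claim_ definition above) =====
set_option maxHeartbeats 1600000 in
theorem detect_bot_type_spec : Claim_equal_detect_bot_type := by
  intro uaO _
  unfold Spec_detect_bot_type
  cases uaO with
  | none => rfl
  | some s =>
    by_cases hs : s = ""
    · simp [detect_bot_type, detect_bot_type_alt, hs]
    · rw [pvAlt_some s hs]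
      simp only [detect_bot_type, if_neg hs]
      by_cases h0 : pvHit ((PySem.Str.lower s).toList) 0
      · have hb : pvBest ((PySem.Str.lower s).toList) = 0 :=
          pvBest_eq_of_first (by omega) (by
            intro j hj; exact absurd hj (Nat.not_lt_zero j)) h0
        have hc : (["googlebot", "google"].any (fun x => PySem.Str.isIn x (PySem.Str.lower s))) = true := (pvHit0_iff s).mp h0
        simp only [hc, if_true, hb, pvLabels]
        rfl
      · have hc0 : (["googlebot", "google"].any (fun x => PySem.Str.isIn x (PySem.Str.lower s))) = false := by
          rw [← Bool.not_eq_true]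
          exact fun h => h0 ((pvHit0_iff s).mpr h)
        by_cases h1 : pvHit ((PySem.Str.lower s).toList) 1
        · have hb : pvBest ((PySem.Str.lower s).toList) = 1 :=
            pvBest_eq_of_first (by omega) (by
              intro j hj
              interval_cases j
              · exact h0) h1
          have hc : (["bingbot", "bing"].any (fun x => PySem.Str.isIn x (PySem.Str.lower s))) = true := (pvHit1_iff s).mp h1
          simp only [hc0, hc, Bool.false_eq_true, if_false, if_true, hb, pvLabels]
          rfl
        · have hc1 : (["bingbot", "bing"].any (fun x => PySem.Str.isIn x (PySem.Str.lower s))) = false := by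
            rw [← Bool.not_eq_true]
            exact fun h => h1 ((pvHit1_iff s).mpr h)
          by_cases h2 : pvHit ((PySem.Str.lower s).toList) 2
          · have hb : pvBest ((PySem.Str.lower s).toList) = 2 :=
              pvBest_eq_of_first (by omega) (by
                intro j hj
                interval_cases j
                · exact h0
                · exact h1) h2
            have hc : (PySem.Str.isIn "yandex" (PySem.Str.lower s)) = true := (pvHit2_iff s).mp h2
            simp only [hc0, hc1, hc, Bool.false_eq_true, if_false, if_true, hb, pvLabels]
            rfl
          · have hc2 : (PySem.Str.isIn "yandex" (PySem.Str.lower s)) = false := by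
              rw [← Bool.not_eq_true]
              exact fun h => h2 ((pvHit2_iff s).mpr h)
            by_cases h3 : pvHit ((PySem.Str.lower s).toList) 3
            · have hb : pvBest ((PySem.Str.lower s).toList) = 3 :=
                pvBest_eq_of_first (by omega) (by
                  intro j hj
                  interval_cases j
                  · exact h0
                  · exact h1
                  · exact h2) h3
              have hc : (PySem.Str.isIn "baidu" (PySem.Str.lower s)) = true := (pvHit3_iff s).mp h3
              simp only [hc0, hc1, hc2, hc, Bool.false_eq_true, if_false, if_true, hb, pvLabels]
              rfl
            · have hc3 : (PySem.Str.isIn "baidu" (PySem.Str.lower s)) = false := by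
                rw [← Bool.not_eq_true]
                exact fun h => h3 ((pvHit3_iff s).mpr h)
              by_cases h4 : pvHit ((PySem.Str.lower s).toList) 4
              · have hb : pvBest ((PySem.Str.lower s).toList) = 4 :=
                  pvBest_eq_of_first (by omega) (by
                    intro j hj
                    interval_cases j
                    · exact h0
                    · exact h1
                    · exact h2
                    · exact h3) h4
                have hc : (["facebook", "facebookexternalhit"].any (fun x => PySem.Str.isIn x (PySem.Str.lower s))) = true := (pvHit4_iff s).mp h4
                simp only [hc0, hc1, hc2, hc3, hc, Bool.false_eq_true, if_false, if_true, hb, pvLabels]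
                rfl
              · have hc4 : (["facebook", "facebookexternalhit"].any (fun x => PySem.Str.isIn x (PySem.Str.lower s))) = false := by
                  rw [← Bool.not_eq_true]
                  exact fun h => h4 ((pvHit4_iff s).mpr h)
                by_cases h5 : pvHit ((PySem.Str.lower s).toList) 5
                · have hb : pvBest ((PySem.Str.lower s).toList) = 5 :=
                    pvBest_eq_of_first (by omega) (by
                      intro j hj
                      interval_cases j
                      · exact h0
                      · exact h1
                      · exact h2
                      · exact h3
                      · exact h4) h5
                  have hc : (PySem.Str.isIn "twitter" (PySem.Str.lower s)) = true := (pvHit5_iff s).mp h5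
                  simp only [hc0, hc1, hc2, hc3, hc4, hc, Bool.false_eq_true, if_false, if_true, hb, pvLabels]
                  rfl
                · have hc5 : (PySem.Str.isIn "twitter" (PySem.Str.lower s)) = false := by
                    rw [← Bool.not_eq_true]
                    exact fun h => h5 ((pvHit5_iff s).mpr h)
                  by_cases h6 : pvHit ((PySem.Str.lower s).toList) 6
                  · have hb : pvBest ((PySem.Str.lower s).toList) = 6 :=
                      pvBest_eq_of_first (by omega) (by
                        intro j hj
                        interval_cases j
                        · exact h0
                        · exact h1
                        · exact h2
                        · exact h3
                        · exact h4
                        · exact h5) h6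
                    have hc : (PySem.Str.isIn "linkedin" (PySem.Str.lower s)) = true := (pvHit6_iff s).mp h6
                    simp only [hc0, hc1, hc2, hc3, hc4, hc5, hc, Bool.false_eq_true, if_false, if_true, hb, pvLabels]
                    rfl
                  · have hc6 : (PySem.Str.isIn "linkedin" (PySem.Str.lower s)) = false := by
                      rw [← Bool.not_eq_true]
                      exact fun h => h6 ((pvHit6_iff s).mpr h)
                    by_cases h7 : pvHit ((PySem.Str.lower s).toList) 7
                    · have hb : pvBest ((PySem.Str.lower s).toList) = 7 :=
                        pvBest_eq_of_first (by omega) (by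
                          intro j hj
                          interval_cases j
                          · exact h0
                          · exact h1
                          · exact h2
                          · exact h3
                          · exact h4
                          · exact h5
                          · exact h6) h7
                      have hc : (["ahrefs", "semrush", "mj12", "dotbot", "serpstat"].any (fun x => PySem.Str.isIn x (PySem.Str.lower s))) = true := (pvHit7_iff s).mp h7
                      simp only [hc0, hc1, hc2, hc3, hc4, hc5, hc6, hc, Bool.false_eq_true, if_false, if_true, hb, pvLabels]
                      rfl
                    · have hc7 : (["ahrefs", "semrush", "mj12", "dotbot", "serpstat"].any (fun x => PySem.Str.isIn x (PySem.Str.lower s))) = false := by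
                        rw [← Bool.not_eq_true]
                        exact fun h => h7 ((pvHit7_iff s).mpr h)
                      by_cases h8 : pvHit ((PySem.Str.lower s).toList) 8
                      · have hb : pvBest ((PySem.Str.lower s).toList) = 8 :=
                          pvBest_eq_of_first (by omega) (by
                            intro j hj
                            interval_cases j
                            · exact h0
                            · exact h1
                            · exact h2
                            · exact h3
                            · exact h4
                            · exact h5
                            · exact h6
                            · exact h7) h8
                        have hc : (["gptbot", "ccbot", "claudebot", "anthropic", "chatgpt"].any (fun x => PySem.Str.isIn x (PySem.Str.lower s))) = true := (pvHit8_iff s).mp h8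
                        simp only [hc0, hc1, hc2, hc3, hc4, hc5, hc6, hc7, hc, Bool.false_eq_true, if_false, if_true, hb, pvLabels]
                        rfl
                      · have hc8 : (["gptbot", "ccbot", "claudebot", "anthropic", "chatgpt"].any (fun x => PySem.Str.isIn x (PySem.Str.lower s))) = false := by
                          rw [← Bool.not_eq_true]
                          exact fun h => h8 ((pvHit8_iff s).mpr h)
                        by_cases h9 : pvHit ((PySem.Str.lower s).toList) 9
                        · have hb : pvBest ((PySem.Str.lower s).toList) = 9 :=
                            pvBest_eq_of_first (by omega) (by
                              intro j hj
                              interval_cases j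
                              · exact h0
                              · exact h1
                              · exact h2
                              · exact h3
                              · exact h4
                              · exact h5
                              · exact h6
                              · exact h7
                              · exact h8) h9
                          have hc : (["curl", "wget", "python", "httpx", "go-http", "java", "apache"].any (fun x => PySem.Str.isIn x (PySem.Str.lower s))) = true := (pvHit9_iff s).mp h9
                          simp only [hc0, hc1, hc2, hc3, hc4, hc5, hc6, hc7, hc8, hc, Bool.false_eq_true, if_false, if_true, hb, pvLabels]
                          rfl
                        · have hc9 : (["curl", "wget", "python", "httpx", "go-http", "java", "apache"].any (fun x => PySem.Str.isIn x (PySem.Str.lower s))) = false := by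
                            rw [← Bool.not_eq_true]
                            exact fun h => h9 ((pvHit9_iff s).mpr h)
                          by_cases h10 : pvHit ((PySem.Str.lower s).toList) 10
                          · have hb : pvBest ((PySem.Str.lower s).toList) = 10 :=
                              pvBest_eq_of_first (by omega) (by
                                intro j hj
                                interval_cases j
                                · exact h0
                                · exact h1
                                · exact h2
                                · exact h3
                                · exact h4
                                · exact h5
                                · exact h6
                                · exact h7
                                · exact h8
                                · exact h9) h10
                            have hc : (["headless", "phantom", "selenium", "puppeteer"].any (fun x => PySem.Str.isIn x (PySem.Str.lower s))) = true := (pvHit10_iff s).mp h10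
                            simp only [hc0, hc1, hc2, hc3, hc4, hc5, hc6, hc7, hc8, hc9, hc, Bool.false_eq_true, if_false, if_true, hb, pvLabels]
                            rfl
                          · have hc10 : (["headless", "phantom", "selenium", "puppeteer"].any (fun x => PySem.Str.isIn x (PySem.Str.lower s))) = false := by
                              rw [← Bool.not_eq_true]
                              exact fun h => h10 ((pvHit10_iff s).mpr h)
                            by_cases h11 : pvHit ((PySem.Str.lower s).toList) 11
                            · have hb : pvBest ((PySem.Str.lower s).toList) = 11 :=
                                pvBest_eq_of_first (by omega) (by
                                  intro j hj
                                  interval_cases j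
                                  · exact h0
                                  · exact h1
                                  · exact h2
                                  · exact h3
                                  · exact h4
                                  · exact h5
                                  · exact h6
                                  · exact h7
                                  · exact h8
                                  · exact h9
                                  · exact h10) h11
                              have hc : (["lighthouse", "pagespeed", "gtmetrix", "pingdom", "uptime", "monitor"].any (fun x => PySem.Str.isIn x (PySem.Str.lower s))) = true := (pvHit11_iff s).mp h11
                              simp only [hc0, hc1, hc2, hc3, hc4, hc5, hc6, hc7, hc8, hc9, hc10, hc, Bool.false_eq_true, if_false, if_true, hb, pvLabels]
                              rfl
                            · have hc11 : (["lighthouse", "pagespeed", "gtmetrix", "pingdom", "uptime", "monitor"].any (fun x => PySem.Str.isIn x (PySem.Str.lower s))) = false := by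
                                rw [← Bool.not_eq_true]
                                exact fun h => h11 ((pvHit11_iff s).mpr h)
                              have hb : pvBest ((PySem.Str.lower s).toList) = 12 := pvBest_eq_twelve (by
                                intro j hj
                                interval_cases j
                                · exact h0
                                · exact h1
                                · exact h2
                                · exact h3
                                · exact h4
                                · exact h5
                                · exact h6
                                · exact h7
                                · exact h8
                                · exact h9
                                · exact h10
                                · exact h11)
                              simp only [hc0, hc1, hc2, hc3, hc4, hc5, hc6, hc7, hc8, hc9, hc10, hc11, Bool.false_eq_true, if_false, hb]
                              rfl
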